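-- pv_equiv track=rewrite | github.com/Araryarch/lazydjango | lazydjango/generators/view_gen.py | _strip_imports
-- ===== SOURCE A (Python) =====
-- def _strip_imports(code: str) -> str:
--     """Strip import statements from code."""
--     lines = code.split("\n")
--     result_lines = []
--     skip_until_blank = False
--     for line in lines:
--         stripped = line.strip()
--         if (
--             stripped.startswith("from django")
--             or stripped.startswith("from .models")
--             or stripped.startswith("import json")
--         ):
--             skip_until_blank = True
--             continue
--         if skip_until_blank:
--             if not stripped:
--                 skip_until_blank = False
--             continue
--         result_lines.append(line)
--     return "\n".join(result_lines).strip()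
-- ===== SOURCE B (Python) =====
-- def _strip_imports(code: str) -> str:
--     """Strip import statements from code."""
--     it = iter(code.split("\n"))
--     result = []
--     for line in it:
--         s = line.strip()
--         if (s.startswith("from django")
--                 or s.startswith("from .models")
--                 or s.startswith("import json")):
--             # consume the rest of the import block: every following
--             # non-blank line, plus the terminating blank line if any
--             for nxt in it:
--                 if not nxt.strip():
--                     break
--         else:
--             result.append(line)
--     return "\n".join(result).strip()
-- ===== Notes on version B (the rewrite author's own statement) =====
-- stated objective: idiomatic
-- what changed: The boolean skip_until_blank flag threaded through one loop is replaced by a shared iterator with a nested inner loop that consumes each import block (non-blank lines plus the terminating blank) on the spot, so no mode flag exists.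
import Mathlib
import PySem

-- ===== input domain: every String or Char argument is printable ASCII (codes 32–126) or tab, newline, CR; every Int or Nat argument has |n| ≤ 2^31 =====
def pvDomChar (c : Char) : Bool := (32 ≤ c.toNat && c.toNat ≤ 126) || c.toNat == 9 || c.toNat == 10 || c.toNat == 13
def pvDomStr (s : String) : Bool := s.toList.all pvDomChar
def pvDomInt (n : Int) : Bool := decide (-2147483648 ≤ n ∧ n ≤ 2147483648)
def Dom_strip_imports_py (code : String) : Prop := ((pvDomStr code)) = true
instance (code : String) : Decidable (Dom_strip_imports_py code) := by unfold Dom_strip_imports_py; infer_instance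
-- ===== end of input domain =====

-- B replaces A's skip_until_blank flag by a shared iterator with a nested loop
-- that consumes each import block on the spot (idiomatic; same cost).

-- ===== PORT A =====
-- A: one pass with a boolean flag threaded through the loop state.
def stripImportsAStep (st : List String × Bool) (line : String) : List String × Bool :=
  let stripped := PySem.Str.strip line
  if PySem.Str.startswith stripped "from django" ||
     PySem.Str.startswith stripped "from .models" ||
     PySem.Str.startswith stripped "import json" then
    (st.1, true)
  else if st.2 then
    (st.1, if stripped == "" then false else true)
  else
    (st.1 ++ [line], st.2)

def strip_imports_py (code : String) : String :=
  let lines := (PySem.Str.split? code "\n").getD []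
  let st := lines.foldl stripImportsAStep ([], false)
  PySem.Str.strip (PySem.Str.join "\n" st.1)

-- ===== PORT B =====
-- B: inner loop over the same iterator: drop non-blank lines, then the blank.
def stripImportsSkipB : List String → List String
  | [] => []
  | nxt :: rest => if PySem.Str.strip nxt == "" then rest else stripImportsSkipB rest

theorem stripImportsSkipB_length_le (l : List String) :
    (stripImportsSkipB l).length ≤ l.length := by
  induction l with
  | nil => simp [stripImportsSkipB]
  | cons x xs ih =>
    simp only [stripImportsSkipB]
    split <;> simp
    omega

def stripImportsGoB : List String → List String
  | [] => []
  | line :: rest =>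
    let s := PySem.Str.strip line
    if PySem.Str.startswith s "from django" ||
       PySem.Str.startswith s "from .models" ||
       PySem.Str.startswith s "import json" then
      stripImportsGoB (stripImportsSkipB rest)
    else
      line :: stripImportsGoB rest
  termination_by l => l.length
  decreasing_by
    · simpa [Nat.lt_succ_iff] using stripImportsSkipB_length_le rest
    · simp

def strip_imports_py_alt (code : String) : String :=
  PySem.Str.strip (PySem.Str.join "\n" (stripImportsGoB ((PySem.Str.split? code "\n").getD [])))

-- ===== PRECONDITION & SPEC =====
def Spec_strip_imports_py (code : String) (out : String) : Prop := out = strip_imports_py_alt code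
instance (code : String) (out : String) : Decidable (Spec_strip_imports_py code out) := by unfold Spec_strip_imports_py; infer_instance

-- ===== CLAIM (what is proved, stated in full; the proofs are below) =====
def Claim_equal_strip_imports_py : Prop := ∀ (code : String), Dom_strip_imports_py code → Spec_strip_imports_py code (strip_imports_py code)

-- ===== LEMMAS AND PROOFS =====

-- an import line is never blank, so B's inner loop always steps over it
theorem imp_not_blank (s : String)
    (h : (PySem.Str.startswith s "from django" ||
          PySem.Str.startswith s "from .models" ||
          PySem.Str.startswith s "import json") = true) :
    (s == "") = false := by
  by_cases hs : s = ""
  · subst hs; revert h; decide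
  · simpa using hs

-- loop invariant: A's fold with the flag false/true matches B's outer/skip mode
theorem fold_eq_goB (lines : List String) : ∀ acc : List String,
    (List.foldl stripImportsAStep (acc, false) lines).1 = acc ++ stripImportsGoB lines
    ∧ (List.foldl stripImportsAStep (acc, true) lines).1
        = acc ++ stripImportsGoB (stripImportsSkipB lines) := by
  induction lines with
  | nil => intro acc; simp [stripImportsGoB, stripImportsSkipB]
  | cons l rest ih =>
    intro acc
    by_cases himp : (PySem.Str.startswith (PySem.Str.strip l) "from django" ||
        PySem.Str.startswith (PySem.Str.strip l) "from .models" ||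
        PySem.Str.startswith (PySem.Str.strip l) "import json") = true
    · constructor
      · simp only [List.foldl_cons, stripImportsAStep, himp, if_true]
        rw [(ih acc).2]
        simp only [stripImportsGoB, himp, if_true]
      · simp only [List.foldl_cons, stripImportsAStep, himp, if_true]
        rw [(ih acc).2]
        simp only [stripImportsSkipB, imp_not_blank _ himp, Bool.false_eq_true, if_false]
    · by_cases hblank : (PySem.Str.strip l == "") = true
      · constructor
        · simp only [List.foldl_cons, stripImportsAStep, himp, if_false, Bool.false_eq_true]
          rw [(ih (acc ++ [l])).1]
          simp only [stripImportsGoB, himp, if_false, Bool.false_eq_true, List.append_assoc,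
            List.singleton_append]
        · simp only [List.foldl_cons, stripImportsAStep, himp, hblank, if_false, if_true,
            Bool.false_eq_true]
          rw [(ih acc).1]
          simp only [stripImportsSkipB, hblank, if_true]
      · constructor
        · simp only [List.foldl_cons, stripImportsAStep, himp, if_false, Bool.false_eq_true]
          rw [(ih (acc ++ [l])).1]
          simp only [stripImportsGoB, himp, if_false, Bool.false_eq_true, List.append_assoc,
            List.singleton_append]
        · simp only [List.foldl_cons, stripImportsAStep, himp, hblank, if_false, if_true,
            Bool.false_eq_true]
          rw [(ih acc).2]
          simp only [stripImportsSkipB, hblank, Bool.false_eq_true, if_false]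

-- ===== VERDICT (by name: the statement is the Claim_ definition above) =====
theorem strip_imports_py_spec : Claim_equal_strip_imports_py := by
  intro code _
  unfold Spec_strip_imports_py strip_imports_py strip_imports_py_alt
  simp only []
  rw [(fold_eq_goB ((PySem.Str.split? code "\n").getD []) []).1]
  simp
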